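-- pv_equiv track=rewrite | github.com/ML77777/KR | SAT3.py | store_clauses
-- ===== SOURCE A (Python) =====
-- def store_clauses(initial_clauses, n_clauses):#,n_variables,n_clauses):
--     clauses_dict = {} #dictionary with key = id and value = clause (= list of strings)
--     literal_dict = {} #dictionary with key = literal and value = list of clauses in which literal occurs
--     assignments = {} #dictionary with key = literal and value = assigned truth value
--     lit_pos_occ = {} #dictionary with key = literal and value = # of positive occurences in not yet satisfied clauses
--     lit_neg_occ = {} #dictionary with key = literal and value = # of negative occurences in not yet satisfied clauses
--     unassigned_literals = [] #list of all literals that do not yet have a truth value assigned to them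
--     changed_literals = []
--     ID = 1
--
--     for clause in initial_clauses:
--         clauses_dict[ID] = clause
--         for literal in clause:
--                 #Add literal to assignments with a 2 for 'unassigned'
--                 if not abs(literal) in assignments:
--                     assignments[abs(literal)] = None
--
--                 #Add clause id to the literal dict for this literal
--                 if abs(literal) in literal_dict:
--                     id_list = literal_dict[abs(literal)]
--                     id_list.append(ID)
--                 else:
--                     id_list = [ID]
--                 literal_dict[abs(literal)] = id_list
--
--                 if literal < 0:
--                 #Add 1 to the the count of negative occurences
--                     if abs(literal) in lit_neg_occ:
--                         lit_neg_occ[abs(literal)] += 1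
--                     else:
--                         lit_neg_occ[abs(literal)] = 1
--                 else:
--                 #Add 1 to the the count of positive occurences
--                     if literal in lit_pos_occ:
--                         lit_pos_occ[literal] += 1
--                     else:
--                         lit_pos_occ[literal] = 1
--
--         if len(clause) == 1: #Found unit clause
--             unit_clause = clause[0]
--             if unit_clause < 0:
--                 #if it is a negative literal
--                 unit_clause = abs(unit_clause)
--
--                 if assignments[unit_clause] == None:
--                     #assignments[unit_clause] = False #assign the literal a 0 for 'false'
--                     changed_literals.append(unit_clause)
--                 elif assignments[unit_clause] == True:
--                     return clauses_dict, n_clauses, literal_dict, assignments, changed_literals, unassigned_literals, lit_pos_occ, lit_neg_occ, True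
--             else:
--                 if assignments[unit_clause] == None:
--                     #assignments[unit_clause] = True #assign the literal a 1 for 'true'
--                     changed_literals.append(unit_clause)
--                     del clauses_dict[ID]
--                 elif assignments[unit_clause] == False:
--                     return clauses_dict, n_clauses, literal_dict, assignments, changed_literals, unassigned_literals, lit_pos_occ, lit_neg_occ, True
--
--             n_clauses -= 1
--
--         ID += 1
--
--     #Check if all literals are present in lit_neg_occ and lit_pos_occ, else it is a pure literal
--     for lit in [k for k, v in assignments.items()]:
--         if not (lit in lit_neg_occ):
--             lit_neg_occ[lit] = 0
--             assignments[lit] = True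
--             if not lit in changed_literals:
--                 changed_literals.append(lit)
--
--
--         if not (lit in lit_pos_occ):
--             lit_pos_occ[lit] = 0
--             assignments[lit] = False
--             if not lit in changed_literals:
--                 changed_literals.append(lit)
--
--     unassigned_literals = [k for k, v in assignments.items() if v == None]
--
--     return clauses_dict, n_clauses, literal_dict, assignments, changed_literals, unassigned_literals, lit_pos_occ, lit_neg_occ, False
-- ===== SOURCE B (Python) =====
-- def store_clauses(initial_clauses, n_clauses):
--     enum = list(enumerate(initial_clauses, 1))
--     units = [(i, c[0]) for i, c in enum if len(c) == 1]
--     clauses_dict = {i: c for i, c in enum if not (len(c) == 1 and c[0] >= 0)}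
--     flat = [(i, lit) for i, c in enum for lit in c]
--     assignments = {abs(lit): None for _, lit in flat}
--     literal_dict = {}
--     for i, lit in flat:
--         literal_dict.setdefault(abs(lit), []).append(i)
--     lit_pos_occ = {}
--     lit_neg_occ = {}
--     for _, lit in flat:
--         if lit < 0:
--             lit_neg_occ[abs(lit)] = lit_neg_occ.get(abs(lit), 0) + 1
--         else:
--             lit_pos_occ[abs(lit)] = lit_pos_occ.get(abs(lit), 0) + 1
--     changed_literals = [abs(u) for _, u in units]
--     n_clauses -= len(units)
--     for lit in assignments:
--         if lit not in lit_neg_occ: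
--             lit_neg_occ[lit] = 0
--             assignments[lit] = True
--             if lit not in changed_literals:
--                 changed_literals.append(lit)
--         if lit not in lit_pos_occ:
--             lit_pos_occ[lit] = 0
--             assignments[lit] = False
--             if lit not in changed_literals:
--                 changed_literals.append(lit)
--     unassigned_literals = [k for k, v in assignments.items() if v is None]
--     return clauses_dict, n_clauses, literal_dict, assignments, changed_literals, unassigned_literals, lit_pos_occ, lit_neg_occ, False
-- ===== Notes on version B (the rewrite author's own statement) =====
-- stated objective: alternative
-- what changed: A builds all five dicts and handles unit clauses interleaved in one stateful pass with an (unreachable) early return; B enumerates the clauses once, flattens them to (id, literal) occurrence pairs, and computes each output component by its own independent comprehension/fold (filter for clauses_dict, a count for n_clauses, a map over the unit list for changed_literals, per-component folds over the flat occurrence list), keeping the pure-literal pass.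
import Mathlib
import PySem

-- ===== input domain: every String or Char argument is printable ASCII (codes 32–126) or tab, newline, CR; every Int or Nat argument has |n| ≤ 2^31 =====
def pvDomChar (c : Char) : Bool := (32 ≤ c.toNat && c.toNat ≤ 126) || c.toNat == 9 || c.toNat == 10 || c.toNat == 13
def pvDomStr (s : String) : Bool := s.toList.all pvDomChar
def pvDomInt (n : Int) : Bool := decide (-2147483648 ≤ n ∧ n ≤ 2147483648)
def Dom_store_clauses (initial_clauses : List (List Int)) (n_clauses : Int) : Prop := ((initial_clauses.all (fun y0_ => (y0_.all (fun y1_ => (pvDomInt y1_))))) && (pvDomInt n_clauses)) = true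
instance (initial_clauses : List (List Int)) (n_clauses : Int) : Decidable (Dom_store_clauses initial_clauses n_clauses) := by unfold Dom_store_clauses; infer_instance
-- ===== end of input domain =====

-- B replaces A's single stateful pass (all five dicts plus unit handling interleaved) by
-- independent per-component folds over an enumerated/flattened view of the clauses
-- (objective: alternative decomposition, same cost).

-- Shared helper: both Pythons contain the IDENTICAL pure-literal pass
-- (for lit in keys(assignments): missing neg-occ → pure positive; missing pos-occ → pure negative).
def purePass (asg : PySem.Dict Int (Option Bool)) (pos neg : PySem.Dict Int Int) (ch : List Int) :
    PySem.Dict Int (Option Bool) × PySem.Dict Int Int × PySem.Dict Int Int × List Int :=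
  asg.keys.foldl (fun st lit =>
    let asg := st.1; let pos := st.2.1; let neg := st.2.2.1; let ch := st.2.2.2
    let st1 : PySem.Dict Int (Option Bool) × PySem.Dict Int Int × List Int :=
      if !neg.contains lit then
        (asg.insert lit (some true), neg.insert lit 0, if ch.contains lit then ch else ch ++ [lit])
      else (asg, neg, ch)
    let asg := st1.1; let neg := st1.2.1; let ch := st1.2.2
    if !pos.contains lit then
      (asg.insert lit (some false), pos.insert lit 0, neg, if ch.contains lit then ch else ch ++ [lit])
    else (asg, pos, neg, ch)) (asg, pos, neg, ch)

-- ===== PORT A =====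
-- per-literal body of A's inner loop, componentwise (assignments / literal_dict / occurrence counters)
def aStepAsg (asg : PySem.Dict Int (Option Bool)) (lit : Int) : PySem.Dict Int (Option Bool) :=
  if asg.contains |lit| then asg else asg.insert |lit| none

def aStepLd (ID : Int) (ld : PySem.Dict Int (List Int)) (lit : Int) : PySem.Dict Int (List Int) :=
  if ld.contains |lit| then ld.insert |lit| (ld.getD |lit| [] ++ [ID]) else ld.insert |lit| [ID]

def aStepOcc (pn : PySem.Dict Int Int × PySem.Dict Int Int) (lit : Int) :
    PySem.Dict Int Int × PySem.Dict Int Int :=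
  if lit < 0 then
    (pn.1, if pn.2.contains |lit| then pn.2.insert |lit| (pn.2.getD |lit| 0 + 1) else pn.2.insert |lit| 1)
  else
    (if pn.1.contains lit then pn.1.insert lit (pn.1.getD lit 0 + 1) else pn.1.insert lit 1, pn.2)

def aLitStep (ID : Int)
    (s : PySem.Dict Int (List Int) × PySem.Dict Int (Option Bool) × (PySem.Dict Int Int × PySem.Dict Int Int))
    (lit : Int) :
    PySem.Dict Int (List Int) × PySem.Dict Int (Option Bool) × (PySem.Dict Int Int × PySem.Dict Int Int) :=
  (aStepLd ID s.1 lit, aStepAsg s.2.1 lit, aStepOcc s.2.2 lit)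

-- A's main loop; `.inl` is A's early `return …, True` (unit clause contradicting an assignment)
def aLoop : List (List Int) → Int → PySem.Dict Int (List Int) → PySem.Dict Int (List Int) →
    PySem.Dict Int (Option Bool) → PySem.Dict Int Int → PySem.Dict Int Int → List Int → Int →
    ((List (Int × List Int)) × Int × (List (Int × List Int)) × (List (Int × Option Bool)) × List Int × List Int × (List (Int × Int)) × (List (Int × Int)) × Bool)
      ⊕ (PySem.Dict Int (List Int) × PySem.Dict Int (List Int) × PySem.Dict Int (Option Bool) × PySem.Dict Int Int × PySem.Dict Int Int × List Int × Int)
  | [], _, cd, ld, asg, pos, neg, ch, n => .inr (cd, ld, asg, pos, neg, ch, n)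
  | clause :: rest, ID, cd, ld, asg, pos, neg, ch, n =>
    let cd' := cd.insert ID clause
    let s := clause.foldl (aLitStep ID) (ld, asg, (pos, neg))
    if clause.length == 1 then
      let u := clause.headD 0      -- clause[0], safe under len == 1
      if u < 0 then
        if s.2.1.getD |u| none == none then
          aLoop rest (ID + 1) cd' s.1 s.2.1 s.2.2.1 s.2.2.2 (ch ++ [|u|]) (n - 1)
        else if s.2.1.getD |u| none == some true then
          .inl (cd'.items, n, s.1.items, s.2.1.items, ch, [], s.2.2.1.items, s.2.2.2.items, true)
        else
          aLoop rest (ID + 1) cd' s.1 s.2.1 s.2.2.1 s.2.2.2 ch (n - 1)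
      else
        if s.2.1.getD u none == none then
          aLoop rest (ID + 1) (cd'.erase ID) s.1 s.2.1 s.2.2.1 s.2.2.2 (ch ++ [u]) (n - 1)
        else if s.2.1.getD u none == some false then
          .inl (cd'.items, n, s.1.items, s.2.1.items, ch, [], s.2.2.1.items, s.2.2.2.items, true)
        else
          aLoop rest (ID + 1) cd' s.1 s.2.1 s.2.2.1 s.2.2.2 ch (n - 1)
    else
      aLoop rest (ID + 1) cd' s.1 s.2.1 s.2.2.1 s.2.2.2 ch n

def store_clauses (initial_clauses : List (List Int)) (n_clauses : Int) : (List (Int × List Int)) × Int × (List (Int × List Int)) × (List (Int × Option Bool)) × List Int × List Int × (List (Int × Int)) × (List (Int × Int)) × Bool :=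
  match aLoop initial_clauses 1 .empty .empty .empty .empty .empty [] n_clauses with
  | .inl r => r
  | .inr (cd, ld, asg, pos, neg, ch, n) =>
    let pp := purePass asg pos neg ch
    let unassigned := (pp.1.items.filter (fun p => p.2 == none)).map (·.1)
    (cd.items, n, ld.items, pp.1.items, pp.2.2.2, unassigned, pp.2.1.items, pp.2.2.1.items, false)

-- ===== PORT B =====
def bUnits (enum : List (Int × List Int)) : List (Int × Int) :=
  enum.filterMap (fun p => if p.2.length == 1 then some (p.1, p.2.headD 0) else none)

def bCD (enum : List (Int × List Int)) (cd : PySem.Dict Int (List Int)) : PySem.Dict Int (List Int) :=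
  (enum.filter (fun p => !(p.2.length == 1 && decide (0 ≤ p.2.headD 0)))).foldl
    (fun d p => d.insert p.1 p.2) cd

def bFlat (enum : List (Int × List Int)) : List (Int × Int) :=
  enum.flatMap (fun p => p.2.map (fun lit => (p.1, lit)))

def bASG (flat : List (Int × Int)) (asg : PySem.Dict Int (Option Bool)) : PySem.Dict Int (Option Bool) :=
  flat.foldl (fun d q => d.insert |q.2| none) asg

-- setdefault(v, []).append(i) mutates the stored list in place: exactly d[v] = d.get(v, []) + [i]
def bLD (flat : List (Int × Int)) (ld : PySem.Dict Int (List Int)) : PySem.Dict Int (List Int) :=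
  flat.foldl (fun d q => d.insert |q.2| (d.getD |q.2| [] ++ [q.1])) ld

def bOCC (flat : List (Int × Int)) (pn : PySem.Dict Int Int × PySem.Dict Int Int) :
    PySem.Dict Int Int × PySem.Dict Int Int :=
  flat.foldl (fun pn q =>
    if q.2 < 0 then (pn.1, pn.2.insert |q.2| (pn.2.getD |q.2| 0 + 1))
    else (pn.1.insert |q.2| (pn.1.getD |q.2| 0 + 1), pn.2)) pn

def store_clauses_alt (initial_clauses : List (List Int)) (n_clauses : Int) : (List (Int × List Int)) × Int × (List (Int × List Int)) × (List (Int × Option Bool)) × List Int × List Int × (List (Int × Int)) × (List (Int × Int)) × Bool :=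
  let enum := PySem.List.enumerate initial_clauses 1
  let units := bUnits enum
  let cd := bCD enum .empty
  let flat := bFlat enum
  let asg0 := bASG flat .empty
  let ld := bLD flat .empty
  let occ := bOCC flat (.empty, .empty)
  let ch0 := units.map (fun p => |p.2|)
  let n := n_clauses - units.length
  let pp := purePass asg0 occ.1 occ.2 ch0
  let unassigned := (pp.1.items.filter (fun p => p.2 == none)).map (·.1)
  (cd.items, n, ld.items, pp.1.items, pp.2.2.2, unassigned, pp.2.1.items, pp.2.2.1.items, false)

-- ===== PRECONDITION & SPEC =====
-- DecidableEq of the 9-tuple output type, built explicitly (instance search hits its size limit)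
def pvDecEq1 : DecidableEq (List (Int × Int) × Bool) := @instDecidableEqProd _ _ inferInstance inferInstance
def pvDecEq2 : DecidableEq (List (Int × Int) × List (Int × Int) × Bool) := @instDecidableEqProd _ _ inferInstance pvDecEq1
def pvDecEq3 : DecidableEq (List Int × List (Int × Int) × List (Int × Int) × Bool) := @instDecidableEqProd _ _ inferInstance pvDecEq2
def pvDecEq4 : DecidableEq (List Int × List Int × List (Int × Int) × List (Int × Int) × Bool) := @instDecidableEqProd _ _ inferInstance pvDecEq3
def pvDecEq5 : DecidableEq (List (Int × Option Bool) × List Int × List Int × List (Int × Int) × List (Int × Int) × Bool) := @instDecidableEqProd _ _ inferInstance pvDecEq4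
def pvDecEq6 : DecidableEq (List (Int × List Int) × List (Int × Option Bool) × List Int × List Int × List (Int × Int) × List (Int × Int) × Bool) := @instDecidableEqProd _ _ inferInstance pvDecEq5
def pvDecEq7 : DecidableEq (Int × List (Int × List Int) × List (Int × Option Bool) × List Int × List Int × List (Int × Int) × List (Int × Int) × Bool) := @instDecidableEqProd _ _ inferInstance pvDecEq6
def pvDecEq8 : DecidableEq ((List (Int × List Int)) × Int × (List (Int × List Int)) × (List (Int × Option Bool)) × List Int × List Int × (List (Int × Int)) × (List (Int × Int)) × Bool) := @instDecidableEqProd _ _ inferInstance pvDecEq7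

def Spec_store_clauses (initial_clauses : List (List Int)) (n_clauses : Int) (out : (List (Int × List Int)) × Int × (List (Int × List Int)) × (List (Int × Option Bool)) × List Int × List Int × (List (Int × Int)) × (List (Int × Int)) × Bool) : Prop := out = store_clauses_alt initial_clauses n_clauses
instance (initial_clauses : List (List Int)) (n_clauses : Int) (out : (List (Int × List Int)) × Int × (List (Int × List Int)) × (List (Int × Option Bool)) × List Int × List Int × (List (Int × Int)) × (List (Int × Int)) × Bool) : Decidable (Spec_store_clauses initial_clauses n_clauses out) := by unfold Spec_store_clauses; exact pvDecEq8 _ _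

-- ===== CLAIM (what is proved, stated in full; the proofs are below) =====
def Claim_equal_store_clauses : Prop := ∀ (initial_clauses : List (List Int)) (n_clauses : Int), Dom_store_clauses initial_clauses n_clauses → Spec_store_clauses initial_clauses n_clauses (store_clauses initial_clauses n_clauses)

-- ===== LEMMAS AND PROOFS =====

-- during A's clause loop every stored assignment value is still None
theorem asg_insert_absorb (d : PySem.Dict Int (Option Bool)) (k : Int)
    (hall : ∀ p ∈ d.items, p.2 = none) (hc : d.contains k = true) :
    d.insert k none = d := by
  apply PySem.Dict.ext
  rw [PySem.Dict.items_insert_of_contains _ _ hc]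
  conv_rhs => rw [← List.map_id d.items]
  apply List.map_congr_left
  intro p hp
  by_cases h : (p.1 == k) = true
  · have h1 : p.1 = k := by simpa using h
    have h2 := hall p hp
    simp [← h1, ← h2]
  · simp [h]

theorem allnone_insert (d : PySem.Dict Int (Option Bool)) (k : Int)
    (hall : ∀ p ∈ d.items, p.2 = none) :
    ∀ p ∈ (d.insert k none).items, p.2 = none := by
  intro p hp
  rcases (PySem.Dict.mem_items_insert _ _ _ _).1 hp with h | ⟨h, _⟩
  · rw [h]
  · exact hall p h

theorem getD_none_of_allnone (d : PySem.Dict Int (Option Bool)) (k : Int)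
    (hall : ∀ p ∈ d.items, p.2 = none) : d.getD k none = none := by
  rw [PySem.Dict.getD_eq_get?_getD]
  cases h : d.get? k with
  | none => rfl
  | some v =>
    have hv := hall _ (PySem.Dict.mem_items_of_get?_eq_some _ h)
    simpa using hv

theorem aStepAsg_eq (d : PySem.Dict Int (Option Bool)) (lit : Int)
    (hall : ∀ p ∈ d.items, p.2 = none) :
    aStepAsg d lit = d.insert |lit| none := by
  unfold aStepAsg
  by_cases h : d.contains |lit| = true
  · rw [if_pos h, asg_insert_absorb _ _ hall h]
  · simp [h]

theorem aStepLd_eq (ID : Int) (d : PySem.Dict Int (List Int)) (lit : Int) :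
    aStepLd ID d lit = d.insert |lit| (d.getD |lit| [] ++ [ID]) := by
  unfold aStepLd
  by_cases h : d.contains |lit| = true
  · simp [h]
  · have h' : d.contains |lit| = false := by simpa using h
    rw [PySem.Dict.getD_of_not_contains _ _ h']
    simp [h']

theorem aStepOcc_eq (pn : PySem.Dict Int Int × PySem.Dict Int Int) (lit : Int) :
    aStepOcc pn lit =
      (if lit < 0 then (pn.1, pn.2.insert |lit| (pn.2.getD |lit| 0 + 1))
       else (pn.1.insert |lit| (pn.1.getD |lit| 0 + 1), pn.2)) := by
  unfold aStepOcc
  by_cases hneg : lit < 0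
  · by_cases h : pn.2.contains |lit| = true
    · simp [hneg, h]
    · have h' : pn.2.contains |lit| = false := by simpa using h
      rw [PySem.Dict.getD_of_not_contains _ _ h']
      simp [hneg, h']
  · have habs : |lit| = lit := abs_of_nonneg (by omega)
    by_cases h : pn.1.contains lit = true
    · simp [hneg, habs, h]
    · have h' : pn.1.contains lit = false := by simpa using h
      rw [habs, PySem.Dict.getD_of_not_contains _ _ h']
      simp [hneg, h']

theorem allnone_bASG (l : List (Int × Int)) : ∀ (asg : PySem.Dict Int (Option Bool)),
    (∀ p ∈ asg.items, p.2 = none) → ∀ p ∈ (bASG l asg).items, p.2 = none := by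
  induction l with
  | nil => intro asg h; simpa [bASG] using h
  | cons x t ih =>
    intro asg h
    simp only [bASG, List.foldl_cons] at *
    exact ih _ (allnone_insert _ _ h)

-- A's inner literal loop equals B's three independent folds over the (id, literal) pairs
theorem inner_fold (ID : Int) (c : List Int) :
    ∀ (ld : PySem.Dict Int (List Int)) (asg : PySem.Dict Int (Option Bool))
      (pos neg : PySem.Dict Int Int),
    (∀ p ∈ asg.items, p.2 = none) →
    c.foldl (aLitStep ID) (ld, asg, (pos, neg)) =
      (bLD (c.map (fun lit => (ID, lit))) ld,
       bASG (c.map (fun lit => (ID, lit))) asg,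
       bOCC (c.map (fun lit => (ID, lit))) (pos, neg)) := by
  induction c with
  | nil => intro ld asg pos neg _; simp [bLD, bASG, bOCC]
  | cons x t ih =>
    intro ld asg pos neg hall
    simp only [List.foldl_cons, List.map_cons, bLD, bASG, bOCC]
    have hstep : aLitStep ID (ld, asg, (pos, neg)) x
        = (aStepLd ID ld x, aStepAsg asg x, aStepOcc (pos, neg) x) := rfl
    rw [hstep, aStepAsg_eq _ _ hall, aStepLd_eq, aStepOcc_eq]
    exact ih _ _ _ _ (allnone_insert _ _ hall)

theorem insert_erase_fresh (d : PySem.Dict Int (List Int)) (i : Int) (c : List Int)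
    (h : ∀ k ∈ d.keys, k < i) : (d.insert i c).erase i = d := by
  have hc : d.contains i = false := by
    by_contra hcc
    have : d.contains i = true := by simpa using hcc
    have : i ∈ d.keys := (PySem.Dict.contains_iff_mem_keys _ _).1 this
    exact absurd (h i this) (by omega)
  apply PySem.Dict.ext
  rw [show ((d.insert i c).erase i).items
      = ((d.insert i c).items.filter (fun p => !(p.1 == i))) from rfl]
  rw [PySem.Dict.items_insert_of_not_contains _ _ hc, List.filter_append]
  have h1 : ([(i, c)].filter (fun p => !(p.1 == i))) = [] := by simp
  have h2 : d.items.filter (fun p => !(p.1 == i)) = d.items := by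
    apply List.filter_eq_self.2
    intro p hp
    have : p.1 ∈ d.keys := by
      simp only [PySem.Dict.keys]
      exact List.mem_map_of_mem hp
    have := h _ this
    simp; omega
  rw [h1, h2, List.append_nil]

theorem keys_insert_lt (d : PySem.Dict Int (List Int)) (i j : Int) (c : List Int)
    (h : ∀ k ∈ d.keys, k < j) (hij : i < j) :
    ∀ k ∈ (d.insert i c).keys, k < j := by
  intro k hk
  rcases (PySem.Dict.mem_keys_insert _ _ _ _).1 hk with h1 | h1
  · omega
  · exact h _ h1


theorem bFlat_cons (p : Int × List Int) (t : List (Int × List Int)) :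
    bFlat (p :: t) = p.2.map (fun lit => (p.1, lit)) ++ bFlat t := by
  simp [bFlat]

theorem bLD_append (l1 l2 : List (Int × Int)) (d : PySem.Dict Int (List Int)) :
    bLD (l1 ++ l2) d = bLD l2 (bLD l1 d) := by
  simp [bLD, List.foldl_append]

theorem bASG_append (l1 l2 : List (Int × Int)) (d : PySem.Dict Int (Option Bool)) :
    bASG (l1 ++ l2) d = bASG l2 (bASG l1 d) := by
  simp [bASG, List.foldl_append]

theorem bOCC_append (l1 l2 : List (Int × Int)) (pn : PySem.Dict Int Int × PySem.Dict Int Int) :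
    bOCC (l1 ++ l2) pn = bOCC l2 (bOCC l1 pn) := by
  simp [bOCC, List.foldl_append]

theorem bUnits_cons_unit (p : Int × List Int) (t : List (Int × List Int)) (h : p.2.length = 1) :
    bUnits (p :: t) = (p.1, p.2.headD 0) :: bUnits t := by
  simp [bUnits, h]

theorem bUnits_cons_nonunit (p : Int × List Int) (t : List (Int × List Int)) (h : p.2.length ≠ 1) :
    bUnits (p :: t) = bUnits t := by
  simp [bUnits, h]

theorem bCD_cons_skip (p : Int × List Int) (t : List (Int × List Int)) (cd : PySem.Dict Int (List Int))
    (h1 : p.2.length = 1) (h2 : ¬ p.2.head?.getD 0 < 0) :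
    bCD (p :: t) cd = bCD t cd := by
  simp [bCD, h1, h2]

theorem bCD_cons_keep1 (p : Int × List Int) (t : List (Int × List Int)) (cd : PySem.Dict Int (List Int))
    (h : p.2.length ≠ 1) :
    bCD (p :: t) cd = bCD t (cd.insert p.1 p.2) := by
  simp [bCD, h]

theorem bCD_cons_keep2 (p : Int × List Int) (t : List (Int × List Int)) (cd : PySem.Dict Int (List Int))
    (h : p.2.head?.getD 0 < 0) :
    bCD (p :: t) cd = bCD t (cd.insert p.1 p.2) := by
  simp [bCD, h]

-- main loop equivalence: A's interleaved pass equals B's independent component folds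
theorem aLoop_eq (cs : List (List Int)) : ∀ (i : Int)
    (cd ld : PySem.Dict Int (List Int)) (asg : PySem.Dict Int (Option Bool))
    (pos neg : PySem.Dict Int Int) (ch : List Int) (n : Int),
    (∀ p ∈ asg.items, p.2 = none) → (∀ k ∈ cd.keys, k < i) →
    aLoop cs i cd ld asg pos neg ch n =
      .inr (bCD (PySem.List.enumerate cs i) cd,
            bLD (bFlat (PySem.List.enumerate cs i)) ld,
            bASG (bFlat (PySem.List.enumerate cs i)) asg,
            (bOCC (bFlat (PySem.List.enumerate cs i)) (pos, neg)).1,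
            (bOCC (bFlat (PySem.List.enumerate cs i)) (pos, neg)).2,
            ch ++ (bUnits (PySem.List.enumerate cs i)).map (fun p => |p.2|),
            n - (bUnits (PySem.List.enumerate cs i)).length) := by
  induction cs with
  | nil =>
    intro i cd ld asg pos neg ch n _ _
    simp [aLoop, PySem.List.enumerate_nil, bCD, bLD, bASG, bOCC, bUnits, bFlat]
  | cons c rest ih =>
    intro i cd ld asg pos neg ch n hall hkeys
    have henum : PySem.List.enumerate (c :: rest) i = (i, c) :: PySem.List.enumerate rest (i + 1) :=
      PySem.List.enumerate_cons ..
    have hallA := allnone_bASG (c.map (fun lit => (i, lit))) asg hall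
    have hkeys' : ∀ k ∈ cd.keys, k < i + 1 := fun k hk => by have := hkeys k hk; omega
    have hkeysIns : ∀ k ∈ (cd.insert i c).keys, k < i + 1 :=
      keys_insert_lt cd i (i + 1) c hkeys' (by omega)
    simp only [aLoop]
    rw [inner_fold i c ld asg pos neg hall]
    by_cases hlen : (c.length == 1) = true
    · have hlen' : c.length = 1 := by simpa using hlen
      have hget := getD_none_of_allnone _ |c.headD 0| hallA
      have hget' := getD_none_of_allnone _ (c.headD 0) hallA
      by_cases hu : c.headD 0 < 0
      · -- negative unit clause: appended to changed_literals, clause kept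
        simp only [hlen, hu, if_pos, hget, beq_self_eq_true]
        rw [ih (i + 1) (cd.insert i c) _ _ _ _ _ _ hallA hkeysIns]
        rw [henum, bCD_cons_keep2 (i, c) _ _ (by simpa using hu),
            bUnits_cons_unit (i, c) _ hlen', bFlat_cons, bLD_append, bASG_append, bOCC_append]
        simp only [Sum.inr.injEq, Prod.mk.injEq, List.map_cons, List.length_cons]
        and_intros <;> first
          | trivial
          | (rw [List.append_assoc]; rfl)
          | omega
      · -- nonnegative unit clause: appended and removed from clauses_dict
        simp only [hlen, hu, hget', beq_self_eq_true, if_true, if_false]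
        rw [insert_erase_fresh cd i c hkeys]
        rw [ih (i + 1) cd _ _ _ _ _ _ hallA hkeys']
        rw [henum, bCD_cons_skip (i, c) _ _ hlen' (by simpa using hu),
            bUnits_cons_unit (i, c) _ hlen', bFlat_cons, bLD_append, bASG_append, bOCC_append]
        have hu' : ¬ c.head?.getD 0 < 0 := by simpa using hu
        have habs : |c.head?.getD 0| = c.head?.getD 0 := abs_of_nonneg (by omega)
        simp only [Sum.inr.injEq, Prod.mk.injEq, List.map_cons, List.length_cons]
        and_intros <;> first
          | trivial
          | omega
          | (simp [List.append_assoc, habs])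
    · -- not a unit clause
      have hlen' : c.length ≠ 1 := by simpa using hlen
      simp only [hlen, Bool.false_eq_true, if_false]
      rw [ih (i + 1) (cd.insert i c) _ _ _ _ _ _ hallA hkeysIns]
      rw [henum, bCD_cons_keep1 (i, c) _ _ hlen', bUnits_cons_nonunit (i, c) _ hlen',
          bFlat_cons, bLD_append, bASG_append, bOCC_append]

-- ===== VERDICT (by name: the statement is the Claim_ definition above) =====
theorem store_clauses_spec : Claim_equal_store_clauses := by
  intro cs n _
  unfold Spec_store_clauses store_clauses store_clauses_alt
  rw [aLoop_eq cs 1 .empty .empty .empty .empty .empty [] n (by simp [PySem.Dict.empty])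
      (by simp [PySem.Dict.keys, PySem.Dict.empty])]
  simp
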